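-- pv_equiv track=rewrite | github.com/AzuelosG/VBF-WZ-lvll | Apply_NN.py | read_phys_models
-- ===== SOURCE A (Python) =====
-- def read_phys_model(file_name):
--
--     s_model_name='GM'
--     if   file_name.find('_HVT')!=-1: s_model_name='HVT'
--     elif file_name.find('_QQ')!=-1:s_model_name='QQ'
--
--     return s_model_name
--
-- def read_phys_models(model_files):
--     idx=0
--     phys_model=''
--     for File in model_files:
--         if idx==0: phys_model=read_phys_model(File)
--         else:
--             if phys_model!=read_phys_model(File):
--                 print ("Something is wrong with signal model names, aborting...")
--                 exit(1)
--                 pass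
--             pass
--         idx+=1
--         pass
--
--     return phys_model
-- ===== SOURCE B (Python) =====
-- def read_phys_model(file_name):
--
--     s_model_name='GM'
--     if   file_name.find('_HVT')!=-1: s_model_name='HVT'
--     elif file_name.find('_QQ')!=-1:s_model_name='QQ'
--
--     return s_model_name
--
-- def read_phys_models(model_files):
--     names = {read_phys_model(f) for f in model_files}
--     if len(names) > 1:
--         print("Something is wrong with signal model names, aborting...")
--         exit(1)
--     return names.pop() if names else ''
-- ===== Notes on version B (the rewrite author's own statement) =====
-- stated objective: simpler
-- what changed: Replaces the indexed first-value-then-compare loop with building the set of distinct model names once and checking its cardinality.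
import Mathlib
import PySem

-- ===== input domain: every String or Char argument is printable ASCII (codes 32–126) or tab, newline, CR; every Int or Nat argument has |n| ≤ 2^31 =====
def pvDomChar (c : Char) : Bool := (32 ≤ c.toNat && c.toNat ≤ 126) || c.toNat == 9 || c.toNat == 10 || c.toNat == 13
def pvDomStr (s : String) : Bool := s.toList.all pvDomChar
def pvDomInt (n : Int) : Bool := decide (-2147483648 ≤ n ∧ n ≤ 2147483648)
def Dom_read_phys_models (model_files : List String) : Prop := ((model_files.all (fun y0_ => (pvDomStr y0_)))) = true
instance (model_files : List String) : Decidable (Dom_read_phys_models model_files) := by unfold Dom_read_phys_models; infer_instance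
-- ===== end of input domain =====

-- B is simpler: it builds the set of distinct model names once instead of A's
-- indexed first-value-then-compare loop. On lists with mixed model names both
-- programs print and exit(1) (SystemExit); those inputs are excluded by Pre_.

-- ===== PORT A =====
def read_phys_model (file_name : String) : String :=
  let s_model_name := "GM"
  if PySem.Str.find file_name "_HVT" ≠ -1 then "HVT"
  else if PySem.Str.find file_name "_QQ" ≠ -1 then "QQ"
  else s_model_name

def read_phys_models (model_files : List String) : String :=
  (model_files.foldl (fun st file =>
      let idx := st.1
      let phys_model := st.2
      if idx = (0 : Int) then (idx + 1, read_phys_model file)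
      else (idx + 1, phys_model)   -- mismatch branch exits(1) in Python; excluded by Pre_
    ) ((0 : Int), "")).2

-- ===== PORT B =====
def read_phys_model_b (file_name : String) : String :=
  let s_model_name := "GM"
  if PySem.Str.find file_name "_HVT" ≠ -1 then "HVT"
  else if PySem.Str.find file_name "_QQ" ≠ -1 then "QQ"
  else s_model_name

def read_phys_models_alt (model_files : List String) : String :=
  let names : PySem.Set String := PySem.Set.ofList (model_files.map read_phys_model_b)
  -- len(names) > 1: Python prints and exits(1); excluded by Pre_
  match names with
  | [] => ""
  | n :: _ => n   -- names.pop() on a one-element set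

-- ===== PRECONDITION & SPEC =====
-- helper used only by Pre_: the model name a file classifies to
def pvModelName (file_name : String) : String :=
  if PySem.Str.find file_name "_HVT" ≠ -1 then "HVT"
  else if PySem.Str.find file_name "_QQ" ≠ -1 then "QQ"
  else "GM"

-- Pre_ excludes exactly the inputs where both A and B print and exit(1)
-- (SystemExit): lists whose files classify to more than one model name.
def Pre_read_phys_models (model_files : List String) : Prop :=
  ∀ f ∈ model_files, pvModelName f = pvModelName (model_files.headD "")
instance (model_files : List String) : Decidable (Pre_read_phys_models model_files) := by unfold Pre_read_phys_models; infer_instance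
def pvWitness_read_phys_models : List String := (["sig_HVT_500.h5", "bkg_HVT_700.h5"])

def Spec_read_phys_models (model_files : List String) (out : String) : Prop := out = read_phys_models_alt model_files
instance (model_files : List String) (out : String) : Decidable (Spec_read_phys_models model_files out) := by unfold Spec_read_phys_models; infer_instance

-- ===== CLAIM (what is proved, stated in full; the proofs are below) =====
def Claim_equal_read_phys_models : Prop := ∀ (model_files : List String), Dom_read_phys_models model_files → Pre_read_phys_models model_files → Spec_read_phys_models model_files (read_phys_models model_files)

-- ===== LEMMAS AND PROOFS =====

theorem pvModelName_eq (f : String) :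
    read_phys_model f = pvModelName f ∧ read_phys_model_b f = pvModelName f := by
  constructor <;> simp [read_phys_model, read_phys_model_b, pvModelName]

-- A's fold keeps phys_model unchanged once idx is positive
theorem foldA_keep (l : List String) (i : Int) (pm : String) (hi : 0 < i) :
    (l.foldl (fun st file =>
        if st.1 = (0 : Int) then (st.1 + 1, read_phys_model file)
        else (st.1 + 1, st.2)) (i, pm)).2 = pm := by
  induction l generalizing i pm with
  | nil => rfl
  | cons h t ih =>
      simp only [List.foldl]
      rw [if_neg (by omega)]
      exact ih (i + 1) pm (by omega)

theorem foldl_add_all_eq (a : String) (l : List String) (h : ∀ x ∈ l, x = a) :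
    l.foldl PySem.Set.add [a] = [a] := by
  induction l with
  | nil => rfl
  | cons p q ih =>
      have hp : p = a := h p (by simp)
      subst hp
      simp only [List.foldl]
      have hstep : PySem.Set.add [p] p = [p] := by simp [PySem.Set.add]
      rw [hstep]
      exact ih (fun x hx => h x (by simp [hx]))

theorem setOfList_all_eq {l : List String} {c : String} (hne : l ≠ [])
    (h : ∀ x ∈ l, x = c) : PySem.Set.ofList l = [c] := by
  cases l with
  | nil => exact absurd rfl hne
  | cons a t =>
      have ha : a = c := h a (by simp)
      subst ha
      rw [PySem.Set.ofList_eq_foldl]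
      simp only [List.foldl]
      have hadd : PySem.Set.add ([] : PySem.Set String) a = [a] := rfl
      rw [hadd]
      exact foldl_add_all_eq a t (fun x hx => h x (by simp [hx]))

-- ===== VERDICT (by name: the statement is the Claim_ definition above) =====
theorem read_phys_models_spec : Claim_equal_read_phys_models := by
  intro model_files _ hpre
  unfold Spec_read_phys_models
  cases model_files with
  | nil => rfl
  | cons h t =>
      set c := pvModelName h with hc
      -- A's value
      have hA : read_phys_models (h :: t) = c := by
        unfold read_phys_models
        simp only [List.foldl, if_true, zero_add]
        rw [foldA_keep t 1 (read_phys_model h) (by omega)]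
        exact (pvModelName_eq h).1
      -- B's value
      have hall : ∀ x ∈ (h :: t).map read_phys_model_b, x = c := by
        intro x hx
        rcases List.mem_map.mp hx with ⟨f, hf, rfl⟩
        rw [(pvModelName_eq f).2]
        have := hpre f hf
        simpa using this
      have hB : read_phys_models_alt (h :: t) = c := by
        unfold read_phys_models_alt
        rw [setOfList_all_eq (by simp) hall]
      rw [hA, hB]
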